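-- pv_equiv track=rewrite | github.com/JoniShap/NLP_ex4 | exercise_blanks.py | get_word_to_ind
-- ===== SOURCE A (Python) =====
-- def get_word_to_ind(words_list):
--     """
--     this function gets a list of words, and returns a mapping between
--     words to their index.
--     :param words_list: a list of words
--     :return: the dictionary mapping words to the index
--     """
--     counter = 0
--     d = {}
--     for word in words_list:
--         if word not in d:
--             d[word] = counter
--             counter += 1
--     return d
-- ===== SOURCE B (Python) =====
-- def get_word_to_ind(words_list):
--     """
--     this function gets a list of words, and returns a mapping between
--     words to their index.
--     :param words_list: a list of words
--     :return: the dictionary mapping words to the index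
--     """
--     # sort-based ranking: record each word's first-occurrence position by a
--     # reversed overwrite pass (later, i.e. smaller, positions win), then sort the
--     # distinct words by that position and enumerate the sorted sequence.  The
--     # sort key is injective (distinct words have distinct first positions), so
--     # the resulting order -- and hence the mapping -- is fully determined.
--     first = {w: i for i, w in reversed(list(enumerate(words_list)))}
--     return {w: rank for rank, w in enumerate(sorted(first, key=first.get))}
-- ===== Notes on version B (the rewrite author's own statement) =====
-- stated objective: alternative
-- what changed: Replaces A's single counter-threaded loop with inline membership guards by a sort-based ranking: a reversed overwrite pass records each word's first-occurrence position (no membership test, no counter), then the distinct words are sorted by that position and enumerated.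
import Mathlib
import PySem

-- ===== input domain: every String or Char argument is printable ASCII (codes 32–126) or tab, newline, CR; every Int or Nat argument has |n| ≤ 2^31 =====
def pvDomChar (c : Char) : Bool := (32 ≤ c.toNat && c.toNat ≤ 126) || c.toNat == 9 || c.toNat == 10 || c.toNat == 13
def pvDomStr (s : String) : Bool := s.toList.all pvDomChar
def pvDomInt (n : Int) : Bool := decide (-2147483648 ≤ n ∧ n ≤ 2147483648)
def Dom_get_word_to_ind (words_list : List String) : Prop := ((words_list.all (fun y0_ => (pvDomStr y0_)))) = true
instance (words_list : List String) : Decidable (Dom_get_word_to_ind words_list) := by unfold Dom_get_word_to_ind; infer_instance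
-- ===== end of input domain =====

-- B replaces A's counter-threaded loop by a sort-based ranking: sort the distinct
-- words by first-occurrence position (injective key) and enumerate; alternative, same result.


-- ===== PORT A =====
-- the loop body: 'if word not in d: d[word] = counter; counter += 1'
def gwtiStep (st : Int × PySem.Dict String Int) (word : String) : Int × PySem.Dict String Int :=
  if st.2.contains word = false then (st.1 + 1, st.2.insert word st.1) else st

def get_word_to_ind (words_list : List String) : List (String × Int) :=
  ((words_list.foldl gwtiStep (0, PySem.Dict.empty)).2).items

-- ===== PORT B =====
-- '{w: i for i, w in reversed(list(enumerate(words_list)))}': a foldl of dict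
-- inserts over the reversed enumerated list (smaller positions overwrite later), then
-- 'sorted(first, key=first.get)' over the dict's keys; the key is injective on the keys
-- (distinct words have distinct first positions), so the sorted order is exact; every
-- sorted element is a dict key, hence 'first.get' never yields None and '.getD 0' is
-- never used.
def get_word_to_ind_alt (words_list : List String) : List (String × Int) :=
  let first : PySem.Dict String Int :=
    ((PySem.List.enumerate words_list 0).reverse).foldl
      (fun d p => d.insert p.2 p.1) PySem.Dict.empty
  (PySem.List.enumerate
    (PySem.List.sorted first.keys (fun w => first.getD w 0)) 0).map (fun p => (p.2, p.1))

-- ===== PRECONDITION & SPEC =====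
def Spec_get_word_to_ind (words_list : List String) (out : List (String × Int)) : Prop := out = get_word_to_ind_alt words_list
instance (words_list : List String) (out : List (String × Int)) : Decidable (Spec_get_word_to_ind words_list out) := by unfold Spec_get_word_to_ind; infer_instance

-- ===== CLAIM (what is proved, stated in full; the proofs are below) =====
def Claim_equal_get_word_to_ind : Prop := ∀ (words_list : List String), Dom_get_word_to_ind words_list → Spec_get_word_to_ind words_list (get_word_to_ind words_list)

-- ===== LEMMAS AND PROOFS =====

-- first-occurrence index of x in l (0 when absent; only used on members)
def pvFidx (l : List String) (x : String) : Nat := (PySem.List.index? l x).getD 0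

-- ordered dedup of ws relative to an already-seen set
def pvSift (seen : List String) : List String → List String
  | [] => []
  | w :: ws => if w ∈ seen then pvSift seen ws else w :: pvSift (w :: seen) ws

theorem pvSift_congr (s t : List String) (ws : List String)
    (h : ∀ x, x ∈ s ↔ x ∈ t) : pvSift s ws = pvSift t ws := by
  induction ws generalizing s t with
  | nil => rfl
  | cons w ws ih =>
    simp only [pvSift]
    by_cases hw : w ∈ s
    · rw [if_pos hw, if_pos ((h w).mp hw)]; exact ih s t h
    · rw [if_neg hw, if_neg (fun hc => hw ((h w).mpr hc))]
      exact congrArg _ (ih (w :: s) (w :: t) (by intro x; simp [h x]))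

theorem pvSet_foldl_add (ws : List String) (s : PySem.Set String) :
    ws.foldl PySem.Set.add s = s ++ pvSift s ws := by
  induction ws generalizing s with
  | nil => simp [pvSift]
  | cons w ws ih =>
    simp only [List.foldl_cons, pvSift, PySem.Set.add]
    by_cases hw : w ∈ s
    · rw [if_pos (by simpa using hw), if_pos hw]; exact ih s
    · rw [if_neg (by simpa using hw), if_neg hw, ih (s ++ [w])]
      rw [pvSift_congr (s ++ [w]) (w :: s) ws (by intro x; simp; tauto)]
      simp

theorem pvDedup_eq_sift (ws : List String) :
    PySem.Set.ofList ws = pvSift [] ws := by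
  simpa [PySem.Set.ofList, PySem.Set.empty] using pvSet_foldl_add ws PySem.Set.empty

theorem pvSift_cons_filter (w : String) (s ws : List String) :
    pvSift (w :: s) ws = pvSift s (ws.filter (fun x => decide (x ≠ w))) := by
  induction ws generalizing s with
  | nil => rfl
  | cons x ws ih =>
    by_cases hxw : x = w
    · subst hxw
      simp only [pvSift, List.filter_cons, decide_not]
      rw [if_pos (by simp)]
      simpa using ih s
    · by_cases hxs : x ∈ s
      · simp only [pvSift, List.filter_cons]
        rw [if_pos (by simp [hxs]), if_pos (by simp [hxw]), pvSift]
        rw [if_pos hxs]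
        exact ih s
      · simp only [pvSift, List.filter_cons]
        rw [if_neg (by simp [hxw, hxs]), if_pos (by simp [hxw]), pvSift,
          if_neg hxs]
        refine congrArg _ ?_
        rw [pvSift_congr (x :: w :: s) (w :: x :: s) ws (by intro y; simp; tauto)]
        exact ih (x :: s)

theorem pvOfList_cons (h : String) (t : List String) :
    PySem.Set.ofList (h :: t) = h :: PySem.Set.ofList (t.filter (fun x => decide (x ≠ h))) := by
  rw [pvDedup_eq_sift, pvDedup_eq_sift]
  show pvSift [] (h :: t) = _
  rw [pvSift]
  rw [if_neg (by simp)]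
  exact congrArg _ (pvSift_cons_filter h [] t)

theorem pvFidx_cons_self (x : String) (t : List String) : pvFidx (x :: t) x = 0 := by
  unfold pvFidx; rw [PySem.List.index?_cons_self]; rfl

theorem pvFidx_cons_mem (h x : String) (t : List String) (hx : x ∈ t) (hne : x ≠ h) :
    pvFidx (h :: t) x = pvFidx t x + 1 := by
  obtain ⟨k, hk⟩ := Option.isSome_iff_exists.mp ((PySem.List.index?_isSome_iff t x).mpr hx)
  unfold pvFidx
  rw [PySem.List.index?_cons_of_ne t (Ne.symm hne), hk]
  rfl

theorem pvFidx_filter_mono (p : String → Bool) (t : List String) (a b : String)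
    (ha : a ∈ t.filter p) (hb : b ∈ t.filter p)
    (hlt : pvFidx (t.filter p) a < pvFidx (t.filter p) b) :
    pvFidx t a < pvFidx t b := by
  induction t with
  | nil => simp at ha
  | cons x t ih =>
    by_cases hpx : p x = true
    · rw [List.filter_cons_of_pos hpx] at ha hb hlt
      by_cases hax : a = x
      · have hb' : b ≠ x := by
          intro hbx
          rw [hax, hbx, pvFidx_cons_self] at hlt
          exact absurd hlt (lt_irrefl 0)
        have hbm : b ∈ t.filter p := by
          rcases List.mem_cons.mp hb with h | h
          · exact absurd h hb'
          · exact h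
        have hbt : b ∈ t := (List.mem_filter.mp hbm).1
        rw [pvFidx_cons_mem x b t hbt hb', hax, pvFidx_cons_self]
        omega
      · have ham : a ∈ t.filter p := by
          rcases List.mem_cons.mp ha with h | h
          · exact absurd h hax
          · exact h
        have hat : a ∈ t := (List.mem_filter.mp ham).1
        have hba : b ≠ x := by
          intro hbx
          rw [pvFidx_cons_mem x a (t.filter p) ham hax, hbx, pvFidx_cons_self] at hlt
          omega
        have hbm : b ∈ t.filter p := by
          rcases List.mem_cons.mp hb with h | h
          · exact absurd h hba
          · exact h
        have hbt : b ∈ t := (List.mem_filter.mp hbm).1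
        rw [pvFidx_cons_mem x a (t.filter p) ham hax,
            pvFidx_cons_mem x b (t.filter p) hbm hba] at hlt
        rw [pvFidx_cons_mem x a t hat hax, pvFidx_cons_mem x b t hbt hba]
        exact Nat.succ_lt_succ (ih ham hbm (Nat.lt_of_succ_lt_succ hlt))
    · have hpx' : ¬ p x = true := hpx
      rw [List.filter_cons_of_neg hpx'] at ha hb hlt
      have hat : a ∈ t := (List.mem_filter.mp ha).1
      have hbt : b ∈ t := (List.mem_filter.mp hb).1
      have hax : a ≠ x := fun h => hpx' (h ▸ (List.mem_filter.mp ha).2)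
      have hbx : b ≠ x := fun h => hpx' (h ▸ (List.mem_filter.mp hb).2)
      rw [pvFidx_cons_mem x a t hat hax, pvFidx_cons_mem x b t hbt hbx]
      exact Nat.succ_lt_succ (ih ha hb hlt)

theorem pvPairwise_fidx (ws : List String) :
    List.Pairwise (fun a b => pvFidx ws a < pvFidx ws b) (PySem.Set.ofList ws) := by
  induction hn : ws.length using Nat.strong_induction_on generalizing ws with
  | _ n ih =>
    cases ws with
    | nil => simp [PySem.Set.ofList, PySem.Set.empty]
    | cons h t =>
      rw [pvOfList_cons]
      set p : String → Bool := fun x => decide (x ≠ h) with hp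
      have hlen : (t.filter p).length < n := by
        subst hn
        exact Nat.lt_succ_of_le (List.length_filter_le _ _)
      have ihp := ih (t.filter p).length hlen (t.filter p) rfl
      have hmemf : ∀ x ∈ PySem.Set.ofList (t.filter p), x ∈ t.filter p := by
        intro x hx; exact (PySem.Set.mem_ofList _ _).mp hx
      constructor
      · intro b hb
        have hbf := hmemf b hb
        have hbt : b ∈ t := (List.mem_filter.mp hbf).1
        have hbh : b ≠ h := by
          have := (List.mem_filter.mp hbf).2; simpa [hp] using this
        rw [pvFidx_cons_mem h b t hbt hbh, pvFidx_cons_self]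
        omega
      · refine List.Pairwise.imp_of_mem ?_ ihp
        intro a b ha hb hlt
        have haf := hmemf a ha
        have hbf := hmemf b hb
        have hah : a ≠ h := by have := (List.mem_filter.mp haf).2; simpa [hp] using this
        have hbh : b ≠ h := by have := (List.mem_filter.mp hbf).2; simpa [hp] using this
        rw [pvFidx_cons_mem h a t (List.mem_filter.mp haf).1 hah,
            pvFidx_cons_mem h b t (List.mem_filter.mp hbf).1 hbh]
        exact Nat.succ_lt_succ (pvFidx_filter_mono p t a b haf hbf hlt)

-- the dict built by B's reversed comprehension, as a foldr over the enumerated list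
def pvBuild (l : List (Int × String)) : PySem.Dict String Int :=
  l.foldr (fun p d => d.insert p.2 p.1) PySem.Dict.empty

theorem pvBuild_get? (t : List String) (k : Int) (x : String) :
    (pvBuild (PySem.List.enumerate t k)).get? x
      = (PySem.List.index? t x).map (fun j => k + (j : Int)) := by
  induction t generalizing k with
  | nil => simp [pvBuild, PySem.List.enumerate_nil, PySem.Dict.get?_empty, PySem.List.index?]
  | cons w t ih =>
    rw [PySem.List.enumerate_cons]
    by_cases hx : x = w
    · subst hx
      show ((pvBuild (PySem.List.enumerate t (k + 1))).insert x k).get? x = _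
      rw [PySem.Dict.get?_insert_self, PySem.List.index?_cons_self]
      simp
    · show ((pvBuild (PySem.List.enumerate t (k + 1))).insert w k).get? x = _
      rw [PySem.Dict.get?_insert_of_ne _ k hx, ih (k + 1),
        PySem.List.index?_cons_of_ne t (Ne.symm hx)]
      cases PySem.List.index? t x with
      | none => rfl
      | some j => simp; ring

theorem pvBuild_nodup_keys (l : List (Int × String)) : (pvBuild l).keys.Nodup := by
  induction l with
  | nil => simp [pvBuild, PySem.Dict.keys, PySem.Dict.empty]
  | cons p l ih => exact PySem.Dict.nodup_keys_insert _ _ _ ih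

theorem pvBuild_mem_keys (ws : List String) (x : String) :
    x ∈ (pvBuild (PySem.List.enumerate ws 0)).keys ↔ x ∈ ws := by
  constructor
  · intro hx
    by_contra hm
    have := (PySem.Dict.get?_eq_none_iff_not_mem_keys (pvBuild (PySem.List.enumerate ws 0)) x).mp
      (by rw [pvBuild_get?, (PySem.List.index?_eq_none_iff ws x).mpr hm]; rfl)
    exact this hx
  · intro hm
    by_contra hx
    obtain ⟨j, hj⟩ := Option.isSome_iff_exists.mp ((PySem.List.index?_isSome_iff ws x).mpr hm)
    have := (PySem.Dict.get?_eq_none_iff_not_mem_keys (pvBuild (PySem.List.enumerate ws 0)) x).mpr hx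
    rw [pvBuild_get?, hj] at this
    simp at this

theorem pvBuild_getD_mem (ws : List String) (x : String) (hm : x ∈ ws) :
    (pvBuild (PySem.List.enumerate ws 0)).getD x 0 = (pvFidx ws x : Int) := by
  obtain ⟨j, hj⟩ := Option.isSome_iff_exists.mp ((PySem.List.index?_isSome_iff ws x).mpr hm)
  rw [PySem.Dict.getD_eq_get?_getD, pvBuild_get?, hj]
  unfold pvFidx
  rw [hj]
  simp

theorem pvSorted_keys (ws : List String) :
    PySem.List.sorted (pvBuild (PySem.List.enumerate ws 0)).keys
        (fun w => (pvBuild (PySem.List.enumerate ws 0)).getD w 0)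
      = PySem.Set.ofList ws := by
  refine PySem.List.sorted_eq_of_perm_of_pairwise_lt _ _ _ ?_ ?_
  · refine (List.perm_ext_iff_of_nodup (PySem.Set.nodup_ofList ws) (pvBuild_nodup_keys _)).mpr ?_
    intro a
    rw [PySem.Set.mem_ofList, pvBuild_mem_keys]
  · refine List.Pairwise.imp_of_mem ?_ (pvPairwise_fidx ws)
    intro a b ha hb hlt
    rw [pvBuild_getD_mem ws a ((PySem.Set.mem_ofList ws a).mp ha),
        pvBuild_getD_mem ws b ((PySem.Set.mem_ofList ws b).mp hb)]
    exact_mod_cast hlt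

theorem pvLoop (ws : List String) (c : Int) (d : PySem.Dict String Int)
    (hnd : d.keys.Nodup) :
    ((ws.foldl gwtiStep (c, d)).2).items
      = d.items ++ (PySem.List.enumerate (pvSift d.keys ws) c).map (fun p => (p.2, p.1)) := by
  induction ws generalizing c d with
  | nil => simp [pvSift]
  | cons w ws ih =>
    simp only [List.foldl_cons, gwtiStep, pvSift]
    by_cases hw : d.contains w = true
    · rw [if_neg (by simp [hw]), if_pos ((PySem.Dict.contains_iff_mem_keys d w).mp hw)]
      exact ih c d hnd
    · have hw' : d.contains w = false := by simpa using hw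
      rw [if_pos (by simp [hw']), if_neg (fun hm => hw ((PySem.Dict.contains_iff_mem_keys d w).mpr hm))]
      rw [ih (c + 1) (d.insert w c) (PySem.Dict.nodup_keys_insert d w c hnd)]
      rw [PySem.Dict.items_insert_of_not_contains d c hw']
      rw [pvSift_congr (d.insert w c).keys (w :: d.keys) ws
        (by intro x; rw [PySem.Dict.keys_insert_of_not_contains d c hw']; simp; tauto)]
      simp [PySem.List.enumerate]

-- ===== VERDICT (by name: the statement is the Claim_ definition above) =====
theorem get_word_to_ind_spec : Claim_equal_get_word_to_ind := by
  intro ws _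
  unfold Spec_get_word_to_ind get_word_to_ind get_word_to_ind_alt
  rw [pvLoop ws 0 PySem.Dict.empty (by simp [PySem.Dict.keys, PySem.Dict.empty])]
  show _ = (PySem.List.enumerate (PySem.List.sorted _ _) 0).map _
  rw [List.foldl_reverse]
  show _ = (PySem.List.enumerate (PySem.List.sorted (pvBuild (PySem.List.enumerate ws 0)).keys
      (fun w => (pvBuild (PySem.List.enumerate ws 0)).getD w 0)) 0).map _
  rw [pvSorted_keys, pvDedup_eq_sift]
  simp [PySem.Dict.empty, PySem.Dict.keys]
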